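-- pv_equiv track=rewrite | github.com/saloni19tyagi/TalentSprint-We-Program | Practice_Problems/FindAbsent.py | FindAbsent
-- ===== SOURCE A (Python) =====
-- def FindAbsent(ListOfRollNum) :
--     ListOfRollNum.sort()
--     AbsentRollNum = 0
--     for i in ListOfRollNum :
--         diff = i - AbsentRollNum
--         if diff != 1 :
--             break ;
--         AbsentRollNum = i
--
--     return (AbsentRollNum+1)
-- ===== SOURCE B (Python) =====
-- def FindAbsent(ListOfRollNum):
--     # O(n): put the roll numbers in a set and return the first positive
--     # integer that is not present.  (Does not mutate the input list.)
--     present = set(ListOfRollNum)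
--     for v in range(1, len(ListOfRollNum) + 2):
--         if v not in present:
--             return v
-- ===== Notes on version B (the rewrite author's own statement) =====
-- stated objective: faster
-- what changed: Replaces sort-then-walk (O(n log n), mutating the input) with a set built in one pass and a scan for the first positive integer not present (O(n)).
-- intended difference: On lists containing a sub-1 entry together with 1, or a duplicated value v with the whole run 1..v+1 present, A's sorted walk breaks on the stray/duplicate element and returns 1 resp. v+1 even though that roll number is present; B returns the smallest positive integer actually absent, which is what a find-the-absent-roll-number function is for. — e.g. on FindAbsent([1, 2, 2, 3]): A returns 3, B returns 4
import Mathlib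
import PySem

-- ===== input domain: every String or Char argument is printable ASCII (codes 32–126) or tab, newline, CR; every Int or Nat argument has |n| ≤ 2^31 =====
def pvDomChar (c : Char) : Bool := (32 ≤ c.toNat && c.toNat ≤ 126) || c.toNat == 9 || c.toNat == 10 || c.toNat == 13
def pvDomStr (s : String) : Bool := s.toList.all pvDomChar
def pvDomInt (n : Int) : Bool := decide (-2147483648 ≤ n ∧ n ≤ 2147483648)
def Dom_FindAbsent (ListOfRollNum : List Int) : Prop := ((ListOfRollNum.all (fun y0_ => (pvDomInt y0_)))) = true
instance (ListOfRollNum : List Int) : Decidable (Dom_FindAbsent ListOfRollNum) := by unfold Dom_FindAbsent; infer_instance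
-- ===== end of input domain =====

-- B replaces A's sort-then-walk with a one-pass set plus a scan for the first positive integer
-- not present; RETURN values only (A sorts its argument in place, B does not mutate it).


-- ===== PORT A =====
-- the 'for i in ListOfRollNum: … break …' loop with accumulator AbsentRollNum
def pvLoopA : List Int → Int → Int
  | [], acc => acc
  | i :: t, acc => if i - acc ≠ 1 then acc else pvLoopA t i

def FindAbsent (ListOfRollNum : List Int) : Int :=
  pvLoopA (PySem.List.sorted ListOfRollNum (fun x => x) false) 0 + 1

-- ===== PORT B =====
-- the 'for v in range(1, len+2): if v not in present: return v' loop; the fallthrough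
-- default 0 is unreachable in Python (some value of the range is always missing)
def pvScanB : List Int → PySem.Set Int → Int
  | [], _ => 0
  | v :: vs, p => if v ∈ p then pvScanB vs p else v

def FindAbsent_alt (ListOfRollNum : List Int) : Int :=
  let present := PySem.Set.ofList ListOfRollNum
  pvScanB (PySem.List.pyRange 1 ((ListOfRollNum.length : Int) + 2) 1) present

-- ===== PRECONDITION & SPEC =====
-- On lists containing a sub-1 entry together with 1, or a duplicated value v with the whole run
-- 1..v+1 present, A's sorted walk breaks on the stray/duplicate element and returns 1 resp. v+1
-- even though that roll number is present; B returns the smallest positive integer actually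
-- absent, which is what a find-the-absent-roll-number function is for.
def D_FindAbsent (ListOfRollNum : List Int) : Prop :=
  ((∃ x ∈ ListOfRollNum, x < 1) ∧ (1 : Int) ∈ ListOfRollNum) ∨
  (∃ v ∈ ListOfRollNum, 1 ≤ v ∧ (v : Int) < (ListOfRollNum.length : Int) ∧
      2 ≤ ListOfRollNum.count v ∧
      ∀ u ∈ List.range (v.toNat + 1), ((u : Int) + 1) ∈ ListOfRollNum)
instance (ListOfRollNum : List Int) : Decidable (D_FindAbsent ListOfRollNum) := by
  unfold D_FindAbsent; infer_instance

def Spec_FindAbsent (ListOfRollNum : List Int) (out : Int) : Prop :=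
  ¬ D_FindAbsent ListOfRollNum → out = FindAbsent_alt ListOfRollNum
instance (ListOfRollNum : List Int) (out : Int) : Decidable (Spec_FindAbsent ListOfRollNum out) := by
  unfold Spec_FindAbsent; infer_instance

def pvDiffWitness_FindAbsent : List Int := [1, 2, 2, 3]
def pvDiffWitnessOut_FindAbsent : Int × Int := (3, 4)

-- ===== CLAIM (what is proved, stated in full; the proofs are below) =====
def Claim_unchanged_FindAbsent : Prop :=
  ∀ (ListOfRollNum : List Int), Dom_FindAbsent ListOfRollNum →
    Spec_FindAbsent ListOfRollNum (FindAbsent ListOfRollNum)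
def Claim_changed_FindAbsent : Prop :=
  Dom_FindAbsent (pvDiffWitness_FindAbsent) ∧ D_FindAbsent (pvDiffWitness_FindAbsent) ∧
  FindAbsent (pvDiffWitness_FindAbsent) = pvDiffWitnessOut_FindAbsent.1 ∧
  FindAbsent_alt (pvDiffWitness_FindAbsent) = pvDiffWitnessOut_FindAbsent.2 ∧
  pvDiffWitnessOut_FindAbsent.1 ≠ pvDiffWitnessOut_FindAbsent.2
def Claim_exact_FindAbsent : Prop :=
  ∀ (ListOfRollNum : List Int), Dom_FindAbsent ListOfRollNum → D_FindAbsent ListOfRollNum →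
    FindAbsent ListOfRollNum ≠ FindAbsent_alt ListOfRollNum

-- ===== LEMMAS AND PROOFS =====

-- B's scan returns 0 (fallthrough) or an element of the scanned range that is not in the set
theorem pvScanB_out (r : List Int) (p : PySem.Set Int) :
    pvScanB r p = 0 ∨ (pvScanB r p ∈ r ∧ pvScanB r p ∉ p) := by
  induction r with
  | nil => left; rfl
  | cons v vs ih =>
      simp only [pvScanB]
      split_ifs with hv
      · rcases ih with h | ⟨h1, h2⟩
        · left; exact h
        · right; exact ⟨List.mem_cons_of_mem _ h1, h2⟩
      · right; exact ⟨List.mem_cons_self, hv⟩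

-- Main bridge: A's walk over the sorted suffix s from acc = v-1, plus one, equals B's scan
-- from v, provided the set agrees with s's support above v and no duplicate sits inside a
-- consecutive run starting at v.
theorem pvBridge (s : List Int) (v : Int) (p : PySem.Set Int)
    (hs : s.Pairwise (· ≤ ·)) (hge : ∀ x ∈ s, v ≤ x)
    (hp : ∀ u, v ≤ u → (u ∈ p ↔ 0 < s.count u))
    (hnd : ¬ ∃ u, v ≤ u ∧ 2 ≤ s.count u ∧ ∀ w, v ≤ w → w ≤ u + 1 → 0 < s.count w) :
    pvLoopA s (v - 1) + 1 = pvScanB (PySem.List.pyRange v (v + (s.length : Int) + 1) 1) p := by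
  induction s generalizing v with
  | nil =>
      rw [PySem.List.pyRange_one_cons (by simp), PySem.List.pyRange_one_eq_nil (by simp)]
      have hvp : v ∉ p := by
        intro h
        have := (hp v le_rfl).mp h
        simp at this
      simp [pvLoopA, pvScanB, hvp]
  | cons x t ih =>
      rw [PySem.List.pyRange_one_cons (by simp only [List.length_cons]; push_cast; omega)]
      simp only [pvScanB]
      rcases hkc : (x :: t).count v with _ | _ | k
      · -- count v = 0 : x > v, A breaks at once; B returns v
        have hxne : x ≠ v := by
          intro h; subst h; rw [List.count_cons_self] at hkc; omega
        have hxv : v ≤ x := hge x (by simp)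
        have hvp : v ∉ p := by
          intro h
          have := (hp v le_rfl).mp h
          omega
        have hne1 : x - (v - 1) ≠ 1 := by omega
        simp [pvLoopA, hne1, hvp]
      · -- count v = 1 : x = v, both step on
        have hxv' : x = v := by
          by_contra hne
          have hv : v ∈ x :: t := List.count_pos_iff.mp (by omega)
          rcases List.mem_cons.mp hv with h | hv
          · exact hne h.symm
          · have h1 := List.rel_of_pairwise_cons hs hv
            have h2 := hge x (by simp)
            omega
        subst hxv'
        have htc : t.count x = 0 := by
          rw [List.count_cons_self] at hkc; omega
        have hvp : x ∈ p := (hp x le_rfl).mpr (by omega)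
        rw [if_pos hvp]
        have hstep : pvLoopA (x :: t) (x - 1) = pvLoopA t ((x + 1) - 1) := by
          simp [pvLoopA]
        rw [hstep]
        have hrec := ih (x + 1) hs.of_cons
          (fun y hy => by
            have h1 := List.rel_of_pairwise_cons hs hy
            have h2 : y ≠ x := by
              intro h; subst h
              exact absurd (List.count_pos_iff.mpr hy) (by omega)
            omega)
          (fun u hu => by
            rw [hp u (by omega), List.count_cons_of_ne (by omega)])
          (by
            rintro ⟨u, hu1, hu2, hu3⟩
            refine hnd ⟨u, by omega, ?_, ?_⟩
            · rw [List.count_cons_of_ne (by omega)]; exact hu2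
            · intro w hw1 hw2
              rcases eq_or_lt_of_le hw1 with h | h
              · subst h; simp
              · rw [List.count_cons_of_ne (by omega)]
                exact hu3 w (by omega) hw2)
        have hb : x + ((x :: t).length : Int) + 1 = (x + 1) + (t.length : Int) + 1 := by
          simp; omega
        rw [hb]
        exact hrec
      · -- count v ≥ 2 : s = v :: v :: t', A returns v+1; B steps once then returns v+1
        have hxv' : x = v := by
          by_contra hne
          have hv : v ∈ x :: t := List.count_pos_iff.mp (by omega)
          rcases List.mem_cons.mp hv with h | hv
          · exact hne h.symm
          · have h1 := List.rel_of_pairwise_cons hs hv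
            have h2 := hge x (by simp)
            omega
        subst hxv'
        have htc : 1 ≤ t.count x := by
          rw [List.count_cons_self] at hkc; omega
        obtain ⟨y, t', rfl⟩ : ∃ y t', t = y :: t' := by
          cases t with
          | nil => simp at htc
          | cons a b => exact ⟨a, b, rfl⟩
        have hyx : y = x := by
          have hmem : x ∈ y :: t' := List.count_pos_iff.mp (by omega)
          have h2 : x ≤ y := List.rel_of_pairwise_cons hs (by simp)
          rcases List.mem_cons.mp hmem with h | hm
          · omega
          · have h1 := List.rel_of_pairwise_cons hs.of_cons hm
            omega
        have hA : pvLoopA (x :: y :: t') (x - 1) = x := by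
          norm_num [pvLoopA, hyx]
        rw [hA]
        have hvp : x ∈ p := (hp x le_rfl).mpr (by omega)
        rw [if_pos hvp]
        -- the next scanned value x+1 is not in the set: otherwise hnd is violated at u = x
        have hcnt1 : (x :: y :: t').count (x + 1) = 0 := by
          by_contra h
          refine hnd ⟨x, le_rfl, by omega, ?_⟩
          intro w hw1 hw2
          rcases (by omega : w = x ∨ w = x + 1) with rfl | rfl
          · omega
          · omega
        have hnp : (x + 1) ∉ p := by
          intro h
          have := (hp (x + 1) (by omega)).mp h
          omega
        rw [PySem.List.pyRange_one_cons (by simp only [List.length_cons]; push_cast; omega)]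
        simp [pvScanB, hnp]

-- A's walk, when a duplicate sits inside a consecutive run starting at v, stops on the
-- duplicate: its result and its result + 1 are both elements of s
theorem pvLoopA_dup (s : List Int) (v : Int)
    (hs : s.Pairwise (· ≤ ·)) (hge : ∀ x ∈ s, v ≤ x)
    (hdup : ∃ u, v ≤ u ∧ 2 ≤ s.count u ∧ ∀ w, v ≤ w → w ≤ u + 1 → 0 < s.count w) :
    pvLoopA s (v - 1) ∈ s ∧ pvLoopA s (v - 1) + 1 ∈ s := by
  induction s generalizing v with
  | nil =>
      obtain ⟨u, _, hu2, _⟩ := hdup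
      simp at hu2
  | cons x t ih =>
      obtain ⟨u, hu1, hu2, hu3⟩ := hdup
      have hcv : 0 < (x :: t).count v := hu3 v le_rfl (by omega)
      have hxv' : x = v := by
        by_contra hne
        have hv : v ∈ x :: t := List.count_pos_iff.mp hcv
        rcases List.mem_cons.mp hv with h | hv
        · exact hne h.symm
        · have h1 := List.rel_of_pairwise_cons hs hv
          have h2 := hge x (by simp)
          omega
      subst hxv'
      rcases hkc : (x :: t).count x with _ | _ | k
      · rw [List.count_cons_self] at hkc; omega
      · -- count x = 1 : step into t at v+1
        have htc : t.count x = 0 := by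
          rw [List.count_cons_self] at hkc; omega
        have hux : u ≠ x := by
          intro h; subst h; omega
        have hstep : pvLoopA (x :: t) (x - 1) = pvLoopA t ((x + 1) - 1) := by
          simp [pvLoopA]
        rw [hstep]
        have hrec := ih (x + 1) hs.of_cons
          (fun y hy => by
            have h1 := List.rel_of_pairwise_cons hs hy
            have h2 : y ≠ x := by
              intro h; subst h
              exact absurd (List.count_pos_iff.mpr hy) (by omega)
            omega)
          ⟨u, by omega, by
              have := hu2
              rwa [List.count_cons_of_ne (by omega)] at this, by
            intro w hw1 hw2
            have := hu3 w (by omega) hw2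
            rwa [List.count_cons_of_ne (by omega)] at this⟩
        exact ⟨List.mem_cons_of_mem _ hrec.1, List.mem_cons_of_mem _ hrec.2⟩
      · -- count x ≥ 2 : result is x; x ∈ s and x+1 ∈ s (from the run)
        have htc : 1 ≤ t.count x := by
          rw [List.count_cons_self] at hkc; omega
        obtain ⟨y, t', rfl⟩ : ∃ y t', t = y :: t' := by
          cases t with
          | nil => simp at htc
          | cons a b => exact ⟨a, b, rfl⟩
        have hyx : y = x := by
          have hmem : x ∈ y :: t' := List.count_pos_iff.mp (by omega)
          have h2 : x ≤ y := List.rel_of_pairwise_cons hs (by simp)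
          rcases List.mem_cons.mp hmem with h | hm
          · omega
          · have h1 := List.rel_of_pairwise_cons hs.of_cons hm
            omega
        have hA : pvLoopA (x :: y :: t') (x - 1) = x := by
          norm_num [pvLoopA, hyx]
        rw [hA]
        refine ⟨by simp, ?_⟩
        have hx1 : 0 < (x :: y :: t').count (x + 1) := by
          rcases eq_or_lt_of_le hu1 with h | h
          · subst h; exact hu3 (x + 1) (by omega) (by omega)
          · exact hu3 (x + 1) (by omega) (by omega)
        exact List.count_pos_iff.mp hx1

-- shared facts about the sorted copy of L
theorem pvSorted_perm (L : List Int) : (PySem.List.sorted L (fun x => x) false).Perm L :=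
  PySem.List.sorted_perm L _ false

theorem pvSorted_pairwise (L : List Int) :
    (PySem.List.sorted L (fun x => x) false).Pairwise (· ≤ ·) := by
  simpa using PySem.List.sorted_pairwise L (fun x => x)

-- when L has an element below 1, A breaks on the sorted head and returns 1
theorem pvA_head_break (L : List Int) (x : Int) (hx : x ∈ L) (hx1 : x < 1) :
    FindAbsent L = 1 := by
  unfold FindAbsent
  set s := PySem.List.sorted L (fun x => x) false with hsdef
  have hperm := pvSorted_perm L
  have hpw := pvSorted_pairwise L
  have hmem : x ∈ s := hperm.mem_iff.mpr hx
  obtain ⟨h, t, hst⟩ : ∃ h t, s = h :: t := by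
    cases hs : s with
    | nil => rw [hs] at hmem; simp at hmem
    | cons a b => exact ⟨a, b, rfl⟩
  have hhm : h ≤ x := by
    rcases List.mem_cons.mp (hst ▸ hmem) with he | hm2
    · omega
    · exact List.rel_of_pairwise_cons (hst ▸ hpw) hm2
  rw [hst]
  simp only [pvLoopA]
  rw [if_pos (by omega : h - 0 ≠ 1)]
  norm_num

-- translation of ¬ D_'s second disjunct into the bridge's no-duplicate-in-run hypothesis
theorem pvNoDup_of_notD (L : List Int) (hnD : ¬ D_FindAbsent L) :
    ¬ ∃ u, (1 : Int) ≤ u ∧ 2 ≤ L.count u ∧ ∀ w, 1 ≤ w → w ≤ u + 1 → 0 < L.count w := by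
  rintro ⟨u, hu1, hu2, hu3⟩
  apply hnD
  right
  have hmemrun : ∀ w ∈ (List.range (u.toNat + 1)).map (fun k : Nat => (k : Int) + 1), w ∈ L := by
    simp only [List.mem_map, List.mem_range]
    rintro w ⟨k, hklt, rfl⟩
    exact List.count_pos_iff.mp (hu3 ((k : Int) + 1) (by omega) (by omega))
  have hlen : u.toNat + 1 ≤ L.length := by
    have hnd' : ((List.range (u.toNat + 1)).map (fun k : Nat => (k : Int) + 1)).Nodup := by
      refine List.Nodup.map ?_ List.nodup_range
      intro a b h
      simpa using h
    have hsp := List.subperm_of_subset hnd' hmemrun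
    simpa using hsp.length_le
  refine ⟨u, List.count_pos_iff.mp (by omega), hu1, by omega, hu2, ?_⟩
  intro w hw
  have hwlt : w < u.toNat + 1 := List.mem_range.mp hw
  have hwu : (w : Int) ≤ u := by
    have h : (w : Int) ≤ (u.toNat : Int) := by exact_mod_cast Nat.lt_succ_iff.mp hwlt
    omega
  exact List.count_pos_iff.mp (hu3 ((w : Int) + 1) (by omega) (by omega))

-- ===== VERDICT (by name: the statements are the Claim_ definitions above) =====
theorem FindAbsent_spec : Claim_unchanged_FindAbsent := by
  intro L _ hnD
  unfold FindAbsent_alt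
  by_cases hneg : ∃ x ∈ L, x < 1
  · -- some entry below 1; then 1 ∉ L (else D_ holds) and both sides return 1
    obtain ⟨x, hx, hx1⟩ := hneg
    have h1L : (1 : Int) ∉ L := fun h => hnD (Or.inl ⟨⟨x, hx, hx1⟩, h⟩)
    rw [pvA_head_break L x hx hx1]
    have hLen : L ≠ [] := fun h => by subst h; simp at hx
    rw [PySem.List.pyRange_one_cons (by
      have : 0 < L.length := List.length_pos_iff.mpr hLen
      omega)]
    have hnp : (1 : Int) ∉ PySem.Set.ofList L := by
      rw [PySem.Set.mem_ofList]; exact h1L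
    simp [pvScanB, hnp]
  · -- all entries ≥ 1: the bridge applies at v = 1
    push Not at hneg
    unfold FindAbsent
    set s := PySem.List.sorted L (fun x => x) false with hsdef
    have hperm := pvSorted_perm L
    have hcnt : ∀ u : Int, s.count u = L.count u := fun u => hperm.count_eq u
    have hmain := pvBridge s 1 (PySem.Set.ofList L) (pvSorted_pairwise L)
      (fun x hx => hneg x (hperm.mem_iff.mp hx))
      (fun u _ => by
        rw [PySem.Set.mem_ofList, hcnt]
        exact ⟨fun h => List.count_pos_iff.mpr h, fun h => List.count_pos_iff.mp h⟩)
      (by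
        simp only [hcnt]
        exact pvNoDup_of_notD L hnD)
    have hb : (1 : Int) + (s.length : Int) + 1 = (L.length : Int) + 2 := by
      rw [hperm.length_eq]; ring
    have h10 : (1 : Int) - 1 = 0 := by norm_num
    rw [hb, h10] at hmain
    exact hmain

theorem FindAbsent_changed : Claim_changed_FindAbsent := by
  unfold Claim_changed_FindAbsent; decide

theorem FindAbsent_tight : Claim_exact_FindAbsent := by
  intro L _ hD
  by_cases hneg : ∃ x ∈ L, x < 1
  · -- A returns 1 while 1 ∈ L, so B cannot return 1 (B returns 0 or a value outside the set)
    obtain ⟨x, hx, hx1⟩ := hneg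
    have h1L : (1 : Int) ∈ L := by
      rcases hD with ⟨_, h⟩ | ⟨v, _, hv1, _, _, hrun⟩
      · exact h
      · simpa using hrun 0 (List.mem_range.mpr (by omega))
    rw [pvA_head_break L x hx hx1]
    unfold FindAbsent_alt
    rcases pvScanB_out (PySem.List.pyRange 1 ((L.length : Int) + 2) 1) (PySem.Set.ofList L)
      with h | ⟨_, h2⟩
    · rw [h]; decide
    · intro heq
      exact h2 (heq ▸ (PySem.Set.mem_ofList L 1).mpr h1L)
  · -- all entries ≥ 1: A stops on the duplicate, so A's value is in L; B's value is not
    push Not at hneg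
    obtain ⟨v, hvL, hv1, _, hcnt2, hrun⟩ : ∃ v ∈ L, 1 ≤ v ∧ (v : Int) < (L.length : Int) ∧
        2 ≤ L.count v ∧ ∀ u ∈ List.range (v.toNat + 1), ((u : Int) + 1) ∈ L := by
      rcases hD with ⟨⟨x, hx, hx1⟩, _⟩ | h
      · exact absurd hx1 (by have := hneg x hx; omega)
      · exact h
    set s := PySem.List.sorted L (fun x => x) false with hsdef
    have hperm := pvSorted_perm L
    have hcnt : ∀ u : Int, s.count u = L.count u := fun u => hperm.count_eq u
    have hdup := pvLoopA_dup s 1 (pvSorted_pairwise L)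
      (fun x hx => hneg x (hperm.mem_iff.mp hx))
      ⟨v, hv1, by rw [hcnt]; exact hcnt2, by
        intro w hw1 hw2
        rw [hcnt]
        apply List.count_pos_iff.mpr
        have := hrun (w - 1).toNat (List.mem_range.mpr (by omega))
        have hcast : ((w - 1).toNat : Int) + 1 = w := by
          rw [Int.toNat_of_nonneg (by omega)]; ring
        rwa [hcast] at this⟩
    have h10 : (1 : Int) - 1 = 0 := by norm_num
    rw [h10] at hdup
    have hAeq : FindAbsent L = pvLoopA s 0 + 1 := by
      rw [hsdef]; rfl
    have hA1 : FindAbsent L ∈ L := by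
      rw [hAeq]
      exact hperm.mem_iff.mp hdup.2
    have hA2 : 2 ≤ FindAbsent L := by
      rw [hAeq]
      have := hneg _ (hperm.mem_iff.mp hdup.1)
      omega
    unfold FindAbsent_alt
    rcases pvScanB_out (PySem.List.pyRange 1 ((L.length : Int) + 2) 1) (PySem.Set.ofList L)
      with h | ⟨_, h2⟩
    · rw [h]; omega
    · intro hexq
      exact h2 (hexq ▸ (PySem.Set.mem_ofList L _).mpr hA1)
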